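-- pv_equiv track=rewrite | github.com/anynomousfriend/Fathom-0x | oracle-node/simple_rag_api.py | simple_semantic_search
-- ===== SOURCE A (Python) =====
-- def simple_semantic_search(chunks, query, top_k=3):
--     """Simple keyword-based search (can be enhanced with embeddings)"""
--     query_words = set(query.lower().split())
--
--     chunk_scores = []
--     for i, chunk in enumerate(chunks):
--         chunk_words = set(chunk.lower().split())
--         # Simple word overlap score
--         overlap = len(query_words & chunk_words)
--         chunk_scores.append((i, overlap, chunk))
--
--     # Sort by score and get top k
--     chunk_scores.sort(key=lambda x: x[1], reverse=True)
--     return [chunk for _, _, chunk in chunk_scores[:top_k]]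
-- ===== SOURCE B (Python) =====
-- def simple_semantic_search(chunks, query, top_k=3):
--     """Bucket (counting-sort) selection: group chunks by overlap score, then
--     emit buckets from highest score down; ties keep original chunk order."""
--     query_words = set(query.lower().split())
--     buckets = {}
--     for chunk in chunks:
--         score = len(query_words & set(chunk.lower().split()))
--         buckets.setdefault(score, []).append(chunk)
--     ordered = []
--     for score in sorted(buckets, reverse=True):
--         ordered.extend(buckets[score])
--     return ordered[:top_k]
-- ===== Notes on version B (the rewrite author's own statement) =====
-- stated objective: alternative
-- what changed: Replaces the stable reverse comparison sort over (index, score, chunk) triples with a bucket/counting-sort selection: chunks are grouped in original order into a dict keyed by overlap score, then buckets are emitted from the highest score down and the result sliced to top_k.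
import Mathlib
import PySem

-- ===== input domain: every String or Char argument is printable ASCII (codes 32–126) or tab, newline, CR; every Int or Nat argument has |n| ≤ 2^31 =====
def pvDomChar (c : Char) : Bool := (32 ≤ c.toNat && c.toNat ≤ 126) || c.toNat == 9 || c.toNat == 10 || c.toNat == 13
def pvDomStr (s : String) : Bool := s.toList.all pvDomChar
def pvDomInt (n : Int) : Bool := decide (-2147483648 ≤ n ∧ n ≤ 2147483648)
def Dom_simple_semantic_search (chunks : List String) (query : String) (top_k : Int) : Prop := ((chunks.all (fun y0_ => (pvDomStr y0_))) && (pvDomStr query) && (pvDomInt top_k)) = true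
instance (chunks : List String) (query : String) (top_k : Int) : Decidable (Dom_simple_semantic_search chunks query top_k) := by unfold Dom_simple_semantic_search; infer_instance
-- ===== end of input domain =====

-- B replaces A's stable reverse comparison sort by a bucket (counting-sort) selection keyed by
-- overlap score; same results, a different algorithm (objective: alternative).

-- ===== PORT A =====
def simple_semantic_search (chunks : List String) (query : String) (top_k : Int) : List String :=
  let query_words := PySem.Set.ofList (PySem.Str.split₀ (PySem.Str.lower query))
  let chunk_scores := (PySem.List.enumerate chunks).foldl (fun acc ic =>
      let chunk_words := PySem.Set.ofList (PySem.Str.split₀ (PySem.Str.lower ic.2))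
      let overlap := PySem.Set.len (PySem.Set.inter query_words chunk_words)
      acc ++ [(ic.1, overlap, ic.2)]) []
  let sortedScores := PySem.List.sorted chunk_scores (fun x => x.2.1) true
  (PySem.List.slice sortedScores none (some top_k)).map (fun x => x.2.2)

-- ===== PORT B =====
def simple_semantic_search_alt (chunks : List String) (query : String) (top_k : Int) : List String :=
  let query_words := PySem.Set.ofList (PySem.Str.split₀ (PySem.Str.lower query))
  let buckets := chunks.foldl (fun d chunk =>
      let score := PySem.Set.len (PySem.Set.inter query_words
        (PySem.Set.ofList (PySem.Str.split₀ (PySem.Str.lower chunk))))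
      d.modify score [] (fun l => l ++ [chunk])) (PySem.Dict.empty : PySem.Dict Int (List String))
  -- `buckets[score]` in the Python never raises (score ranges over buckets' keys): getD is exact here
  let ordered := (PySem.List.sorted buckets.keys (fun k => k) true).foldl
      (fun acc s => acc ++ buckets.getD s []) []
  PySem.List.slice ordered none (some top_k)

-- ===== PRECONDITION & SPEC =====
def Spec_simple_semantic_search (chunks : List String) (query : String) (top_k : Int) (out : List String) : Prop := out = simple_semantic_search_alt chunks query top_k
instance (chunks : List String) (query : String) (top_k : Int) (out : List String) : Decidable (Spec_simple_semantic_search chunks query top_k out) := by unfold Spec_simple_semantic_search; infer_instance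

-- ===== CLAIM (what is proved, stated in full; the proofs are below) =====
def Claim_equal_simple_semantic_search : Prop := ∀ (chunks : List String) (query : String) (top_k : Int), Dom_simple_semantic_search chunks query top_k → Spec_simple_semantic_search chunks query top_k (simple_semantic_search chunks query top_k)

-- ===== LEMMAS AND PROOFS =====

theorem insertBy_nil {α : Type} (before : α → α → Bool) (x : α) :
    PySem.List.insertBy before x [] = [x] := rfl

theorem insertBy_cons {α : Type} (before : α → α → Bool) (x y : α) (ys : List α) :
    PySem.List.insertBy before x (y :: ys) =
      if before x y then x :: y :: ys else y :: PySem.List.insertBy before x ys := rfl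

-- insertBy passes over a block none of whose elements trigger `before`
theorem insertBy_append_not {α : Type} (before : α → α → Bool) (x : α) (l r : List α)
    (h : ∀ y ∈ l, before x y = false) :
    PySem.List.insertBy before x (l ++ r) = l ++ PySem.List.insertBy before x r := by
  induction l with
  | nil => simp
  | cons y t ih =>
      rw [List.cons_append, insertBy_cons, if_neg (by simp [h y (by simp)]),
        ih (fun z hz => h z (by simp [hz]))]
      rfl

-- x goes in front of a list all of whose elements trigger `before`
theorem insertBy_front {α : Type} (before : α → α → Bool) (x : α) (l : List α)
    (h : ∀ y ∈ l, before x y = true) :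
    PySem.List.insertBy before x l = x :: l := by
  cases l with
  | nil => rfl
  | cons y t => rw [insertBy_cons, if_pos (h y (by simp))]

theorem flatMap_congr_mem {α β : Type} (l : List α) (f f' : α → List β)
    (h : ∀ a ∈ l, f a = f' a) : l.flatMap f = l.flatMap f' := by
  induction l with
  | nil => rfl
  | cons a t ih =>
      simp only [List.flatMap_cons, h a (by simp), ih (fun b hb => h b (by simp [hb]))]

-- stability core, existing key: x joins the end of its own bucket
theorem insertBy_flatMap_mem {α : Type} (key : α → Int) (x : α) (ks : List Int)
    (g : Int → List α)
    (Hg : ∀ k, ∀ a ∈ g k, key a = k) (Hne : ∀ k ∈ ks, g k ≠ [])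
    (Hdesc : ks.Pairwise (· > ·)) (hmem : key x ∈ ks) :
    PySem.List.insertBy (fun a b => decide (key b < key a)) x (ks.flatMap g)
      = ks.flatMap (fun k => g k ++ if key x = k then [x] else []) := by
  induction ks with
  | nil => simp at hmem
  | cons k ks' ih =>
      rw [List.pairwise_cons] at Hdesc
      obtain ⟨hk, hd'⟩ := Hdesc
      rw [List.flatMap_cons, List.flatMap_cons]
      by_cases hkx : key x = k
      · rw [insertBy_append_not _ _ _ _ (fun y hy => by simp [Hg k y hy, hkx])]
        have hfront : PySem.List.insertBy (fun a b => decide (key b < key a)) x (ks'.flatMap g)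
            = x :: ks'.flatMap g := by
          apply insertBy_front
          intro y hy
          obtain ⟨k', hk', hy'⟩ := List.mem_flatMap.mp hy
          simp [Hg k' y hy', hkx ▸ hk k' hk']
        rw [hfront]
        have hcong : ks'.flatMap (fun k' => g k' ++ if key x = k' then [x] else [])
            = ks'.flatMap g := by
          apply flatMap_congr_mem
          intro k' hk'
          rw [if_neg (by have := hk k' hk'; omega), List.append_nil]
        rw [hcong, if_pos hkx]
        simp
      · have hmem' : key x ∈ ks' := by
          rcases List.mem_cons.mp hmem with h | h
          · exact absurd h hkx
          · exact h
        have hgt : k > key x := hk _ hmem'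
        rw [insertBy_append_not _ _ _ _
            (fun y hy => by simp only [decide_eq_false_iff_not, not_lt, Hg k y hy]; omega)]
        rw [ih (fun k' h' => Hne k' (by simp [h'])) hd' hmem', if_neg hkx, List.append_nil]

-- stability core, new key: x forms a fresh bucket at the right place
theorem insertBy_flatMap_not_mem {α : Type} (key : α → Int) (x : α) (ks : List Int)
    (g : Int → List α)
    (Hg : ∀ k, ∀ a ∈ g k, key a = k) (Hne : ∀ k ∈ ks, g k ≠ [])
    (Hdesc : ks.Pairwise (· > ·)) (hmem : key x ∉ ks) (hx : g (key x) = []) :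
    PySem.List.insertBy (fun a b => decide (key b < key a)) x (ks.flatMap g)
      = (PySem.List.insertBy (fun a b => decide (b < a)) (key x) ks).flatMap
          (fun k => g k ++ if key x = k then [x] else []) := by
  induction ks with
  | nil => simp [insertBy_nil, hx]
  | cons k ks' ih =>
      rw [List.pairwise_cons] at Hdesc
      obtain ⟨hk, hd'⟩ := Hdesc
      have hkx : key x ≠ k := fun h => hmem (by simp [h])
      rw [List.flatMap_cons, insertBy_cons (fun a b => decide (b < a)) (key x) k ks']
      by_cases hlt : k < key x
      · rw [if_pos (by simpa using hlt), List.flatMap_cons, List.flatMap_cons]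
        have hfront : PySem.List.insertBy (fun a b => decide (key b < key a)) x
            (g k ++ ks'.flatMap g) = x :: (g k ++ ks'.flatMap g) := by
          apply insertBy_front
          intro y hy
          rcases List.mem_append.mp hy with hy | hy
          · simp only [decide_eq_true_iff, Hg k y hy]; omega
          · obtain ⟨k', hk', hy'⟩ := List.mem_flatMap.mp hy
            have := hk k' hk'
            simp only [decide_eq_true_iff, Hg k' y hy']; omega
        rw [hfront, hx, if_pos rfl, if_neg hkx, List.append_nil]
        have hcong : ks'.flatMap (fun k' => g k' ++ if key x = k' then [x] else [])
            = ks'.flatMap g := by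
          apply flatMap_congr_mem
          intro k' hk'
          rw [if_neg (by have := hk k' hk'; omega), List.append_nil]
        rw [hcong]
        simp
      · have hgt : k > key x := by omega
        rw [if_neg (by simpa using hlt), List.flatMap_cons,
          insertBy_append_not _ _ _ _
            (fun y hy => by simp only [decide_eq_false_iff_not, not_lt, Hg k y hy]; omega),
          ih (fun k' h' => Hne k' (by simp [h'])) hd' (fun h => hmem (by simp [h])),
          if_neg hkx, List.append_nil]

-- sorted distinct scores, descending, are strictly descending
theorem sorted_keys_desc (l : List Int) :
    (PySem.List.sorted (PySem.Set.ofList l) (fun k => k) true).Pairwise (· > ·) := by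
  have h1 := PySem.List.sorted_pairwise_rev (PySem.Set.ofList l) (fun k : Int => k)
  have h2 : (PySem.List.sorted (PySem.Set.ofList l) (fun k : Int => k) true).Nodup :=
    ((PySem.List.sorted_perm (PySem.Set.ofList l) (fun k : Int => k) true).nodup_iff).mpr
      (PySem.Set.nodup_ofList l)
  exact (h1.and h2).imp (fun {a b} ⟨hle, hne⟩ => lt_of_le_of_ne hle (Ne.symm hne))

-- a stable reverse sort by an Int key is the concatenation of the key buckets, best first
theorem sorted_rev_eq_buckets {α : Type} (xs : List α) (key : α → Int) :
    PySem.List.sorted xs key true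
      = (PySem.List.sorted (PySem.Set.ofList (xs.map key)) (fun k => k) true).flatMap
          (fun k => xs.filter (fun a => decide (key a = k))) := by
  induction xs using List.reverseRecOn with
  | nil => simp [PySem.List.sorted]
  | append_singleton xs x ih =>
      rw [PySem.List.sorted_rev_eq_foldl_insertBy, List.foldl_append, List.foldl_cons,
        List.foldl_nil, ← PySem.List.sorted_rev_eq_foldl_insertBy, ih]
      have hset : PySem.Set.ofList ((xs ++ [x]).map key)
          = PySem.Set.add (PySem.Set.ofList (xs.map key)) (key x) := by
        rw [List.map_append, PySem.Set.ofList_eq_foldl, List.foldl_append,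
          ← PySem.Set.ofList_eq_foldl]
        rfl
      set ks := PySem.List.sorted (PySem.Set.ofList (xs.map key)) (fun k : Int => k) true with hks
      have Hg : ∀ k : Int, ∀ a ∈ xs.filter (fun a => decide (key a = k)), key a = k := by
        intro k a ha
        simpa using (List.mem_filter.mp ha).2
      have Hne : ∀ k ∈ ks, xs.filter (fun a => decide (key a = k)) ≠ [] := by
        intro k hkk
        have : k ∈ xs.map key := by
          have := (PySem.List.mem_sorted _ _ _ _).mp hkk
          exact (PySem.Set.mem_ofList _ _).mp this
        obtain ⟨a, ha, hak⟩ := List.mem_map.mp this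
        intro hnil
        rw [List.filter_eq_nil_iff] at hnil
        exact hnil a ha (by simp [hak])
      have Hdesc := sorted_keys_desc (xs.map key)
      rw [← hks] at Hdesc
      have hfilterapp : ∀ k : Int, (xs ++ [x]).filter (fun a => decide (key a = k))
          = xs.filter (fun a => decide (key a = k)) ++ if key x = k then [x] else [] := by
        intro k
        rw [List.filter_append]
        congr 1
        by_cases h : key x = k <;> simp [h]
      by_cases hmem : key x ∈ PySem.Set.ofList (xs.map key)
      · have hsame : PySem.Set.add (PySem.Set.ofList (xs.map key)) (key x)
            = PySem.Set.ofList (xs.map key) := by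
          rw [PySem.Set.add,
            if_pos (by simpa [PySem.Set.contains, List.contains_iff_mem] using hmem)]
        rw [hset, hsame, ← hks]
        have hmemks : key x ∈ ks := (PySem.List.mem_sorted _ _ _ _).mpr hmem
        rw [insertBy_flatMap_mem key x ks _ Hg Hne Hdesc hmemks]
        exact (flatMap_congr_mem _ _ _ (fun k _ => (hfilterapp k).symm)) ▸ rfl
      · have happ : PySem.Set.add (PySem.Set.ofList (xs.map key)) (key x)
            = PySem.Set.ofList (xs.map key) ++ [key x] := by
          rw [PySem.Set.add,
            if_neg (by simpa [PySem.Set.contains, List.contains_iff_mem] using hmem)]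
        have hsortapp : PySem.List.sorted (PySem.Set.ofList (xs.map key) ++ [key x]) (fun k : Int => k) true
            = PySem.List.insertBy (fun a b => decide (b < a)) (key x) ks := by
          rw [PySem.List.sorted_rev_eq_foldl_insertBy, List.foldl_append, List.foldl_cons,
            List.foldl_nil, ← PySem.List.sorted_rev_eq_foldl_insertBy, ← hks]
        have hmemks : key x ∉ ks := fun h =>
          hmem ((PySem.List.mem_sorted _ _ _ _).mp h)
        have hx : xs.filter (fun a => decide (key a = key x)) = [] := by
          rw [List.filter_eq_nil_iff]
          intro a ha
          simp only [decide_eq_true_iff]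
          intro h
          exact hmem ((PySem.Set.mem_ofList _ _).mpr (List.mem_map.mpr ⟨a, ha, h⟩))
        rw [hset, happ, hsortapp,
          insertBy_flatMap_not_mem key x ks _ Hg Hne Hdesc hmemks hx]
        exact flatMap_congr_mem _ _ _ (fun k _ => (hfilterapp k).symm)

theorem slice_map {α β : Type} (f : α → β) (l : List α) (a b : Option Int) :
    (PySem.List.slice l a b).map f = PySem.List.slice (l.map f) a b := by
  simp [PySem.List.slice, List.map_take, List.map_drop]

theorem enumerate_filter_snd {α : Type} (l : List α) (p : α → Bool) (n : Int) :
    ((PySem.List.enumerate l n).filter (fun ic => p ic.2)).map (fun ic => ic.2)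
      = l.filter p := by
  induction l generalizing n with
  | nil => simp [PySem.List.enumerate]
  | cons x t ih =>
      simp only [PySem.List.enumerate, List.filter_cons]
      by_cases h : p x <;> simp [h, ih]

theorem enumerate_map_snd {α : Type} (l : List α) (n : Int) :
    (PySem.List.enumerate l n).map (fun ic => ic.2) = l := by
  induction l generalizing n with
  | nil => simp [PySem.List.enumerate]
  | cons x t ih => simp [PySem.List.enumerate, ih]

theorem bucket_getD (sc : String → Int) (chunks : List String)
    (d : PySem.Dict Int (List String)) (s : Int) :
    (chunks.foldl (fun d c => d.modify (sc c) [] (fun l => l ++ [c])) d).getD s []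
      = d.getD s [] ++ chunks.filter (fun c => decide (sc c = s)) := by
  induction chunks generalizing d with
  | nil => simp
  | cons c t ih =>
      rw [List.foldl_cons, ih, List.filter_cons]
      simp only [PySem.Dict.modify, PySem.Dict.getD_insert]
      by_cases h : sc c = s
      · simp [h]
      · simp only [h, decide_false, Bool.false_eq_true, if_false,
          if_neg (fun hh : s = sc c => h (Eq.symm hh))]

-- the whole equivalence, for an abstract per-chunk score function sc
theorem core_eq (sc : String → Int) (chunks : List String) (top_k : Int) :
    (PySem.List.slice
        (PySem.List.sorted
          ((PySem.List.enumerate chunks).foldl (fun acc ic => acc ++ [(ic.1, sc ic.2, ic.2)]) [])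
          (fun x => x.2.1) true) none (some top_k)).map (fun x => x.2.2)
      = PySem.List.slice
          ((PySem.List.sorted
              (chunks.foldl (fun d c => d.modify (sc c) [] (fun l => l ++ [c]))
                (PySem.Dict.empty : PySem.Dict Int (List String))).keys
              (fun k => k) true).foldl
            (fun acc s => acc ++ (chunks.foldl (fun d c => d.modify (sc c) [] (fun l => l ++ [c]))
                (PySem.Dict.empty : PySem.Dict Int (List String))).getD s []) [])
          none (some top_k) := by
  set buckets := chunks.foldl (fun d c => d.modify (sc c) [] (fun l => l ++ [c]))
      (PySem.Dict.empty : PySem.Dict Int (List String)) with hb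
  -- A's accumulating loop is a map over the enumeration
  have hscored : (PySem.List.enumerate chunks).foldl
      (fun acc ic => acc ++ [(ic.1, sc ic.2, ic.2)]) []
      = (PySem.List.enumerate chunks).map (fun ic => (ic.1, sc ic.2, ic.2)) := by
    have h := PySem.List.foldl_append_eq_flatMap
      (fun ic : Int × String => [(ic.1, sc ic.2, ic.2)]) (PySem.List.enumerate chunks) []
    exact h.trans (by rw [List.nil_append]; exact Eq.symm List.map_eq_flatMap)
  -- B's key list is the set of scores in first-appearance order
  have hkeys : buckets.keys = PySem.Set.ofList (chunks.map sc) := by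
    rw [hb, PySem.Dict.keys_foldl_modify_key chunks sc [] (fun _ c => (fun l => l ++ [c])),
      PySem.Dict.keys_empty, PySem.Set.update_nil_left]
  -- B's buckets are the filters
  have hget : ∀ s : Int, buckets.getD s [] = chunks.filter (fun c => decide (sc c = s)) := by
    intro s
    rw [hb, bucket_getD]
    rfl
  rw [hscored, slice_map,
    sorted_rev_eq_buckets ((PySem.List.enumerate chunks).map (fun ic => (ic.1, sc ic.2, ic.2)))
      (fun x => x.2.1),
    PySem.List.foldl_append_eq_flatMap, List.nil_append, hkeys]
  congr 1
  have hmapkey : ((PySem.List.enumerate chunks).map (fun ic => (ic.1, sc ic.2, ic.2))).map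
      (fun x : Int × Int × String => x.2.1) = chunks.map sc := by
    rw [List.map_map]
    have : (PySem.List.enumerate chunks).map (fun ic => sc ic.2)
        = ((PySem.List.enumerate chunks).map (fun ic => ic.2)).map sc := by
      rw [List.map_map]; rfl
    rw [show ((fun x : Int × Int × String => x.2.1) ∘ (fun ic : Int × String => (ic.1, sc ic.2, ic.2)))
        = fun ic : Int × String => sc ic.2 from rfl, this, enumerate_map_snd]
  rw [List.map_flatMap, hmapkey]
  apply flatMap_congr_mem
  intro k _
  rw [hget k, List.filter_map, List.map_map,
    show ((fun x : Int × Int × String => x.2.2) ∘ (fun ic : Int × String => (ic.1, sc ic.2, ic.2)))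
      = fun ic : Int × String => ic.2 from rfl]
  exact enumerate_filter_snd chunks (fun c => decide (sc c = k)) 0

-- ===== VERDICT (by name: the statement is the Claim_ definition above) =====
theorem simple_semantic_search_spec : Claim_equal_simple_semantic_search := by
  intro chunks query top_k _
  unfold Spec_simple_semantic_search simple_semantic_search simple_semantic_search_alt
  exact core_eq
    (fun c => PySem.Set.len (PySem.Set.inter
      (PySem.Set.ofList (PySem.Str.split₀ (PySem.Str.lower query)))
      (PySem.Set.ofList (PySem.Str.split₀ (PySem.Str.lower c)))))
    chunks top_k
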